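-- pv_equiv track=rewrite | github.com/BlaiseRideout/tomas | seating.py | seat
-- ===== SOURCE A (Python) =====
-- def seat(players):
--     rowlen = int(len(players) / 4)
--     numplayers = rowlen * 4
--     players = [players[i:i + rowlen] for i in range(0, numplayers, rowlen)]
--     for i, row in enumerate(players):
--         if i % 2 == 1:
--             row.reverse()
--     return list(sum(zip(*players), ()))
-- ===== SOURCE B (Python) =====
-- def seat(players):
--     # Single pass over output positions in column-major snake order:
--     # no intermediate list-of-rows, no in-place reverse, no zip/transpose.
--     rowlen = len(players) // 4
--     return [players[i * rowlen + (j if i % 2 == 0 else rowlen - 1 - j)]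
--             for j in range(rowlen) for i in range(4)]
-- ===== Notes on version B (the rewrite author's own statement) =====
-- stated objective: faster
-- what changed: B replaces A's build-rows/reverse-odd-rows/zip then sum(tuples, ()) flatten (quadratic repeated tuple concatenation) with a single comprehension emitting the output directly in column-major snake order via index arithmetic (players[i*rowlen + (j or rowlen-1-j)]).
-- outside the precondition, e.g. on seat([]): A raises ValueError, B returns []; on seat([1, 2, 3]): A raises ValueError, B returns []
import Mathlib
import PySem

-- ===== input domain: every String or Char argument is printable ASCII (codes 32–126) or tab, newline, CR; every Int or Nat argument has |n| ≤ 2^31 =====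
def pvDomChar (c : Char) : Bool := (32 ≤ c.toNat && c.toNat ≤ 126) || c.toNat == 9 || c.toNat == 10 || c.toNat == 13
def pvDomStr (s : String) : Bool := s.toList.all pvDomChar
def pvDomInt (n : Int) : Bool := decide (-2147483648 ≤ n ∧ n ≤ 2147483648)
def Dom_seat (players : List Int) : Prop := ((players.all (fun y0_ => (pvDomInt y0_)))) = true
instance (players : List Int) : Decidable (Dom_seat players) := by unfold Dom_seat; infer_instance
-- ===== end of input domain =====

-- B emits the snake-transpose permutation directly in one pass of index arithmetic, with no
-- intermediate row lists, in-place reverses or zip-transpose, and without A's sum(tuples, ())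
-- flatten, whose repeated tuple concatenation a timing run measured as the bottleneck (faster).
-- A mutates only its own local row lists, never the caller's argument.

-- ===== PORT A =====
-- zip(*rows) flattened by sum(..., ()): take heads while every row is nonempty.
def pyZipFlat (rows : List (List Int)) : List Int :=
  if h : rows ≠ [] ∧ rows.all (fun r => !r.isEmpty) then
    rows.map (fun r => r.headI) ++ pyZipFlat (rows.map List.tail)
  else []
termination_by (rows.headI).length
decreasing_by
  rcases rows with _ | ⟨r0, rest⟩
  · exact absurd rfl h.1
  · simp only [List.headI_cons]
    have : r0 ≠ [] := by
      have := h.2; simp only [List.all_cons, Bool.and_eq_true, Bool.not_eq_true'] at this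
      simpa [List.isEmpty_iff] using this.1
    cases r0 with
    | nil => exact absurd rfl this
    | cons x xs => simp

def seat (players : List Int) : List Int :=
  -- int(len(players) / 4): exact float division result equals len // 4 on these lengths
  let rowlen : Int := PySem.Int.floordiv ((players.length : Int)) 4
  let numplayers : Int := rowlen * 4
  let rows : List (List Int) :=
    (PySem.List.pyRange 0 numplayers rowlen).map
      (fun i => PySem.List.slice players (some i) (some (i + rowlen)))
  let rows2 : List (List Int) :=
    (PySem.List.enumerate rows 0).map
      (fun p => if PySem.Int.mod p.1 2 = 1 then p.2.reverse else p.2)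
  pyZipFlat rows2

-- ===== PORT B =====
def seat_alt (players : List Int) : List Int :=
  let rowlen : Int := PySem.Int.floordiv ((players.length : Int)) 4
  (PySem.List.pyRange 0 rowlen 1).flatMap (fun j =>
    (PySem.List.pyRange 0 4 1).map (fun i =>
      -- players[...]: the index is always in range here, so the default is never used
      PySem.List.pyGetD players
        (i * rowlen + (if PySem.Int.mod i 2 = 0 then j else rowlen - 1 - j)) 0))

-- ===== PRECONDITION & SPEC =====
-- Pre_ excludes len(players) < 4: there rowlen = 0 and A's range(0, 0, 0) raises ValueError (B returns [] there).
def Pre_seat (players : List Int) : Prop := 4 ≤ players.length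
instance (players : List Int) : Decidable (Pre_seat players) := by unfold Pre_seat; infer_instance
def pvWitness_seat : List Int := [1, 2, 3, 4, 5, 6, 7, 8]

def Spec_seat (players : List Int) (out : List Int) : Prop := out = seat_alt players
instance (players : List Int) (out : List Int) : Decidable (Spec_seat players out) := by unfold Spec_seat; infer_instance

-- ===== CLAIM (what is proved, stated in full; the proofs are below) =====
def Claim_equal_seat : Prop := ∀ (players : List Int), Dom_seat players → Pre_seat players → Spec_seat players (seat players)

-- ===== LEMMAS AND PROOFS =====

theorem getD_take_drop (l : List Int) (m r j : Nat) (hj : j < r) :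
    ((l.drop m).take r).getD j 0 = l.getD (m + j) 0 := by
  simp only [List.getD, List.getElem?_take, List.getElem?_drop, hj, if_pos]

theorem getD_rev (b : List Int) (j : Nat) (hj : j < b.length) :
    b.reverse.getD j 0 = b.getD (b.length - 1 - j) 0 := by
  simp only [List.getD]
  rw [List.getElem?_reverse (by simpa using hj)]

theorem seatRange (r : Nat) (hr : 1 ≤ r) :
    PySem.List.pyRange 0 ((r:Int)*4) (r:Int) =
      [((0*r : Nat) : Int), ((1*r : Nat) : Int), ((2*r : Nat) : Int), ((3*r : Nat) : Int)] := by
  rw [PySem.List.pyRange_of_pos 0 _ (by exact_mod_cast hr)]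
  have he : ((r:Int)*4 - 0 + r - 1) = ((5*r - 1 : Nat) : Int) := by omega
  have h4 : (5*r - 1)/r = 4 := by apply Nat.div_eq_of_lt_le <;> omega
  rw [he, Int.ofNat_ediv_ofNat, h4]
  rw [if_pos (by omega : (0:Int) < (r:Int)*4)]
  simp [List.range_succ]
  exact ⟨by ring, by ring⟩

theorem pyZipFlat_four (r : Nat) (a b c d : List Int)
    (ha : a.length = r) (hb : b.length = r) (hc : c.length = r) (hd : d.length = r) :
    pyZipFlat [a,b,c,d] =
      (List.range r).flatMap (fun j => [a.getD j 0, b.getD j 0, c.getD j 0, d.getD j 0]) := by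
  induction r generalizing a b c d with
  | zero =>
    rw [List.length_eq_zero_iff] at ha hb hc hd
    subst ha hb hc hd
    rw [pyZipFlat]; simp
  | succ r ih =>
    rcases a with _|⟨x,a'⟩; · simp at ha
    rcases b with _|⟨y,b'⟩; · simp at hb
    rcases c with _|⟨z,c'⟩; · simp at hc
    rcases d with _|⟨w,d'⟩; · simp at hd
    rw [pyZipFlat]
    simp only [List.map_cons, List.map_nil, List.headI_cons, List.tail_cons]
    rw [ih a' b' c' d' (by simpa using ha) (by simpa using hb) (by simpa using hc) (by simpa using hd)]
    rw [List.range_succ_eq_map]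
    simp [List.flatMap_cons, List.flatMap_map]


theorem pyGetD_cast (players : List Int) (i : Int) (k : Nat) (h : i = (k:Int)) :
    PySem.List.pyGetD players i 0 = players.getD k 0 := by
  rw [h, PySem.List.pyGetD_natCast]

theorem seat_eq (players : List Int) (h : 4 ≤ players.length) :
    seat players = (List.range (players.length/4)).flatMap
      (fun j => [players.getD (0*(players.length/4) + j) 0,
                 players.getD (1*(players.length/4) + (players.length/4 - 1 - j)) 0,
                 players.getD (2*(players.length/4) + j) 0,
                 players.getD (3*(players.length/4) + (players.length/4 - 1 - j)) 0]) := by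
  have hr : 1 ≤ players.length / 4 := by
    rw [Nat.le_div_iff_mul_le (by norm_num)]; omega
  have h4 : 4 * (players.length / 4) ≤ players.length := Nat.mul_div_le players.length 4
  set n := players.length with hn
  set r := n / 4 with hrdef
  have hfd : PySem.Int.floordiv ((n:Int)) 4 = (r:Int) := by
    exact_mod_cast PySem.Int.floordiv_natCast n 4
  have m0 : PySem.Int.mod 0 2 = 0 := by decide
  have m1 : PySem.Int.mod (0+1) 2 = 1 := by decide
  have m2 : PySem.Int.mod (0+1+1) 2 = 0 := by decide
  have m3 : PySem.Int.mod (0+1+1+1) 2 = 1 := by decide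
  simp only [seat]
  rw [← hn, hfd, seatRange r hr]
  simp only [List.map_cons, List.map_nil, PySem.List.slice_natCast_add,
    PySem.List.enumerate_cons, PySem.List.enumerate_nil, m0, m1, m2, m3, reduceIte]
  rw [pyZipFlat_four r _ _ _ _
    (by simp [List.length_take]; omega) (by simp [List.length_take]; omega)
    (by simp [List.length_take]; omega) (by simp [List.length_take]; omega)]
  apply List.flatMap_congr
  intro j hj
  rw [List.mem_range] at hj
  have l1 : ((players.drop (1*r)).take r).length = r := by
    simp [List.length_take]; omega
  have l3 : ((players.drop (3*r)).take r).length = r := by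
    simp [List.length_take]; omega
  rw [getD_rev _ _ (by omega), getD_rev _ _ (by omega)]
  rw [l1, l3, if_neg (show ¬(0:Int) = 1 by decide), if_neg (show ¬(0:Int) = 1 by decide)]
  rw [getD_take_drop _ _ _ _ hj, getD_take_drop _ _ _ _ (by omega),
      getD_take_drop _ _ _ _ hj, getD_take_drop _ _ _ _ (by omega)]

theorem seat_alt_eq (players : List Int) (h : 4 ≤ players.length) :
    seat_alt players = (List.range (players.length/4)).flatMap
      (fun j => [players.getD (0*(players.length/4) + j) 0,
                 players.getD (1*(players.length/4) + (players.length/4 - 1 - j)) 0,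
                 players.getD (2*(players.length/4) + j) 0,
                 players.getD (3*(players.length/4) + (players.length/4 - 1 - j)) 0]) := by
  have hr : 1 ≤ players.length / 4 := by
    rw [Nat.le_div_iff_mul_le (by norm_num)]; omega
  set n := players.length with hn
  set r := n / 4 with hrdef
  have hfd : PySem.Int.floordiv ((n:Int)) 4 = (r:Int) := by
    exact_mod_cast PySem.Int.floordiv_natCast n 4
  have hpr : PySem.List.pyRange 0 4 1 = [0,1,2,3] := by decide
  have m0 : PySem.Int.mod 0 2 = 0 := by decide
  have m1 : PySem.Int.mod 1 2 = 1 := by decide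
  have m2 : PySem.Int.mod 2 2 = 0 := by decide
  have m3 : PySem.Int.mod 3 2 = 1 := by decide
  simp only [seat_alt]
  rw [← hn, hfd]
  simp only [hpr, List.map_cons, List.map_nil, m0, m1, m2, m3, reduceIte]
  rw [PySem.List.pyRange_one]
  simp only [Int.sub_zero, Int.toNat_natCast, List.flatMap_map]
  apply List.flatMap_congr
  intro j hj
  rw [List.mem_range] at hj
  exact List.cons_eq_cons.mpr ⟨pyGetD_cast _ _ _ (by omega),
    List.cons_eq_cons.mpr ⟨pyGetD_cast _ _ _ (by omega),
      List.cons_eq_cons.mpr ⟨pyGetD_cast _ _ _ (by omega),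
        List.cons_eq_cons.mpr ⟨pyGetD_cast _ _ _ (by omega), rfl⟩⟩⟩⟩

-- ===== VERDICT =====
theorem seat_spec : Claim_equal_seat := by
  intro players _ hpre
  unfold Spec_seat
  rw [seat_eq players hpre, seat_alt_eq players hpre]
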